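-- pv_equiv track=rewrite | github.com/ScottRBK/mycelium | mycelium/phases/processes.py | _classify_process
-- ===== SOURCE A (Python) =====
-- def _classify_process(trace: list[str], community_map: dict[str, str]) -> str:
--     """Classify process as intra_community or cross_community."""
--     communities_seen = set()
--     for sym_id in trace:
--         comm = community_map.get(sym_id)
--         if comm:
--             communities_seen.add(comm)
--
--     if len(communities_seen) <= 1:
--         return "intra_community"
--     return "cross_community"
-- ===== SOURCE B (Python) =====
-- def _classify_process(trace: list[str], community_map: dict[str, str]) -> str:
--     """Classify process as intra_community or cross_community."""
--     first = None
--     for sym_id in trace: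
--         comm = community_map.get(sym_id)
--         if not comm:
--             continue
--         if first is None:
--             first = comm
--         elif comm != first:
--             return "cross_community"
--     return "intra_community"
-- ===== Notes on version B (the rewrite author's own statement) =====
-- stated objective: simpler
-- what changed: Replaces the set of distinct communities with a single 'first community' scalar and returns 'cross_community' immediately on the first differing community, instead of accumulating a set and counting it at the end.
import Mathlib
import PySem

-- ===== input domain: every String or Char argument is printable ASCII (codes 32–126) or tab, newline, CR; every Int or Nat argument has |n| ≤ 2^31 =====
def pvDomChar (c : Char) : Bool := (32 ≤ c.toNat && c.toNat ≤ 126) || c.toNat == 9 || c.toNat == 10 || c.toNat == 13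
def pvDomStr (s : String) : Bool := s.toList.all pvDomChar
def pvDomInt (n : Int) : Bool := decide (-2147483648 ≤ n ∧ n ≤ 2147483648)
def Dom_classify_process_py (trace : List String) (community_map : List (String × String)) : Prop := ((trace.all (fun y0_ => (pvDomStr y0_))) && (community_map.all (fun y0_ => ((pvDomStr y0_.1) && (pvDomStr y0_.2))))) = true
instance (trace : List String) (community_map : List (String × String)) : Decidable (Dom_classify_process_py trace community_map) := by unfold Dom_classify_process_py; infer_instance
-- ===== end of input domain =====

-- B replaces A's distinct-community set with a single first-community scalar and an early return: simpler, no set.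


-- ===== PORT A =====
-- the loop building the set of truthy communities seen (comm is truthy iff present and ≠ "")
def pvSeenStep (community_map : List (String × String)) (s : PySem.Set String) (sym_id : String) : PySem.Set String :=
  match community_map.lookup sym_id with
  | none => s
  | some comm => if comm ≠ "" then PySem.Set.add s comm else s

def classify_process_py (trace : List String) (community_map : List (String × String)) : String :=
  let communities_seen := trace.foldl (pvSeenStep community_map) PySem.Set.empty
  if PySem.Set.len communities_seen ≤ 1 then "intra_community" else "cross_community"

-- ===== PORT B =====
-- single pass keeping only the first truthy community; early return on a differing one
def pvAltLoop (community_map : List (String × String)) : List String → Option String → String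
  | [], _ => "intra_community"
  | sym_id :: rest, first =>
    match community_map.lookup sym_id with
    | none => pvAltLoop community_map rest first
    | some comm =>
      if comm = "" then pvAltLoop community_map rest first
      else
        match first with
        | none => pvAltLoop community_map rest (some comm)
        | some f => if comm ≠ f then "cross_community" else pvAltLoop community_map rest first

def classify_process_py_alt (trace : List String) (community_map : List (String × String)) : String :=
  pvAltLoop community_map trace none

-- ===== PRECONDITION & SPEC =====
def Spec_classify_process_py (trace : List String) (community_map : List (String × String)) (out : String) : Prop := out = classify_process_py_alt trace community_map
instance (trace : List String) (community_map : List (String × String)) (out : String) : Decidable (Spec_classify_process_py trace community_map out) := by unfold Spec_classify_process_py; infer_instance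

-- ===== CLAIM (what is proved, stated in full; the proofs are below) =====
def Claim_equal_classify_process_py : Prop := ∀ (trace : List String) (community_map : List (String × String)), Dom_classify_process_py trace community_map → Spec_classify_process_py trace community_map (classify_process_py trace community_map)

-- ===== LEMMAS AND PROOFS =====

-- Set.add never shrinks the set
theorem pvSeenStep_len_mono (cm : List (String × String)) (s : PySem.Set String) (x : String) :
    s.length ≤ (pvSeenStep cm s x).length := by
  unfold pvSeenStep
  cases cm.lookup x with
  | none => simp
  | some c =>
    by_cases h : c = "" <;> simp [h, PySem.Set.add]
    split <;> simp

theorem pvFold_len_mono (cm : List (String × String)) (rest : List String) (s : PySem.Set String) :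
    s.length ≤ (rest.foldl (pvSeenStep cm) s).length := by
  induction rest generalizing s with
  | nil => simp
  | cons x xs ih =>
    simpa [List.foldl] using le_trans (pvSeenStep_len_mono cm s x) (ih (pvSeenStep cm s x))

-- main invariant: B's loop with state 'first' equals A's verdict from the corresponding set
theorem pvAltLoop_eq (cm : List (String × String)) (rest : List String) :
    (pvAltLoop cm rest none =
      (if PySem.Set.len (rest.foldl (pvSeenStep cm) []) ≤ 1 then "intra_community" else "cross_community"))
    ∧ ∀ f : String, f ≠ "" →
      pvAltLoop cm rest (some f) =
        (if PySem.Set.len (rest.foldl (pvSeenStep cm) [f]) ≤ 1 then "intra_community" else "cross_community") := by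
  induction rest with
  | nil => simp [pvAltLoop, PySem.Set.len]
  | cons x xs ih =>
    constructor
    · show pvAltLoop cm (x :: xs) none = _
      rw [pvAltLoop]
      cases hg : cm.lookup x with
      | none => simpa [List.foldl, pvSeenStep, hg] using ih.1
      | some c =>
        by_cases hc : c = ""
        · simpa [List.foldl, pvSeenStep, hg, hc] using ih.1
        · have : pvSeenStep cm [] x = [c] := by
            simp [pvSeenStep, hg, hc, PySem.Set.add, PySem.Set.contains]
          simpa [List.foldl, hg, hc, this] using ih.2 c hc
    · intro f hf
      show pvAltLoop cm (x :: xs) (some f) = _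
      rw [pvAltLoop]
      cases hg : cm.lookup x with
      | none => simpa [List.foldl, pvSeenStep, hg] using ih.2 f hf
      | some c =>
        by_cases hc : c = ""
        · simpa [List.foldl, pvSeenStep, hg, hc] using ih.2 f hf
        · by_cases hcf : c = f
          · have : pvSeenStep cm [f] x = [f] := by
              simp [pvSeenStep, hg, hcf, PySem.Set.add, PySem.Set.contains]
            simpa [List.foldl, hg, hc, hcf, this] using ih.2 f hf
          · -- B returns cross; A's set already has two elements, so its length stays ≥ 2
            have hstep : pvSeenStep cm [f] x = [f, c] := by
              simp [pvSeenStep, hg, hc, PySem.Set.add, PySem.Set.contains, hcf]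
            have h2 : 2 ≤ (xs.foldl (pvSeenStep cm) [f, c]).length := by
              simpa using pvFold_len_mono cm xs [f, c]
            simp [List.foldl, hc, hcf, hstep, PySem.Set.len]
            omega

-- ===== VERDICT (by name: the statement is the Claim_ definition above) =====
theorem classify_process_py_spec : Claim_equal_classify_process_py := by
  intro trace cm _
  unfold Spec_classify_process_py classify_process_py classify_process_py_alt
  exact ((pvAltLoop_eq cm trace).1).symm
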